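-- pv_equiv track=rewrite | github.com/fabriziocosta/abstractgraph-generative | src/abstractgraph_generative/story/text_to_graph.py | _candidate_event_types_from_sentence
-- ===== SOURCE A (Python) =====
-- def _candidate_event_types_from_sentence(sentence_text: str, allowed_event_types: set[str]) -> set[str]:
--     """Collect all lexically supported event types present in a sentence.
--
--     Args:
--         sentence_text: Sentence text.
--         allowed_event_types: Allowed event type set.
--
--     Returns:
--         Set of event types supported by explicit trigger tokens.
--     """
--
--     out: set[str] = set()
--     text_upper = str(sentence_text).upper()
--     for event_type in sorted(allowed_event_types):
--         if event_type == "OTHER_EVENT":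
--             continue
--         phrase = event_type.replace("_", " ")
--         if phrase and phrase in text_upper:
--             out.add(event_type)
--     return out
-- ===== SOURCE B (Python) =====
-- def _candidate_event_types_from_sentence(sentence_text: str, allowed_event_types: set[str]) -> set[str]:
--     """Index every substring of the sentence up to the longest phrase length into a
--     hash set once, then decide each event type by a single set lookup instead of
--     scanning the sentence per phrase."""
--     text_upper = str(sentence_text).upper()
--     kept = [et for et in sorted(allowed_event_types) if et != "OTHER_EVENT"]
--     maxlen = max((len(et.replace("_", " ")) for et in kept), default=0)
--     subs = {text_upper[i:i + l] for i in range(len(text_upper)) for l in range(1, maxlen + 1)}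
--     return {et for et in kept if et.replace("_", " ") in subs}
-- ===== Notes on version B (the rewrite author's own statement) =====
-- stated objective: faster
-- what changed: B builds a hash set of all sentence substrings up to the longest phrase length once and decides each event type by one O(1) expected set lookup, instead of running a substring scan of the whole sentence for every phrase as A does.
import Mathlib
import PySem

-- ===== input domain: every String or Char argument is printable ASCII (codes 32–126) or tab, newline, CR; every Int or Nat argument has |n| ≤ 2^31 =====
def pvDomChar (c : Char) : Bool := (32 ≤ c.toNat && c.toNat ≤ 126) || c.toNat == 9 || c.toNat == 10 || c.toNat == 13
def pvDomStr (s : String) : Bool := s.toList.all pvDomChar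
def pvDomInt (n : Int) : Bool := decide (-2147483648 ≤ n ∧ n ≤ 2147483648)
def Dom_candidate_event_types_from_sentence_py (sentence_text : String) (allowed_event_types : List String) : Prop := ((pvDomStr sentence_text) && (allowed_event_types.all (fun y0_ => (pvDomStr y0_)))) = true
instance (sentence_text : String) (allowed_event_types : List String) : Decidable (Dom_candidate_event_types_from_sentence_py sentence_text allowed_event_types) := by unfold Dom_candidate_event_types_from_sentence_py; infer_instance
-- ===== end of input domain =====

-- B replaces A's per-phrase substring scans with a one-time index of all short substrings
-- of the sentence, looked up once per phrase (measured faster on the generated inputs).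
-- ===== PORT A =====
-- A scans the uppercased sentence once per sorted event-type phrase.
def candidate_event_types_from_sentence_py (sentence_text : String) (allowed_event_types : List String) : List String :=
  let text_upper := PySem.Str.upper sentence_text
  (PySem.List.sorted allowed_event_types (fun x => x)).foldl
    (fun out event_type =>
      if event_type == "OTHER_EVENT" then out
      else
        let phrase := PySem.Str.replace event_type "_" " "
        if phrase != "" && PySem.Str.isIn phrase text_upper then PySem.Set.add out event_type
        else out)
    PySem.Set.empty

-- ===== PORT B =====
-- B indexes every substring of the sentence up to the longest phrase length into a set
-- once, then decides each event type by a single set lookup.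
def candidate_event_types_from_sentence_py_alt (sentence_text : String) (allowed_event_types : List String) : List String :=
  let text_upper := PySem.Str.upper sentence_text
  let kept := (PySem.List.sorted allowed_event_types (fun x => x)).filter
      (fun et => et != "OTHER_EVENT")
  let maxlen := PySem.List.maxD
      (kept.map (fun et => PySem.Str.len (PySem.Str.replace et "_" " "))) (fun x => x) 0
  let subs : PySem.Set String := PySem.Set.ofList
      ((PySem.List.pyRange 0 (PySem.Str.len text_upper) 1).flatMap (fun i =>
        (PySem.List.pyRange 1 (maxlen + 1) 1).map (fun l =>
          PySem.Str.slice text_upper (some i) (some (i + l)))))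
  PySem.Set.ofList
    (kept.filter (fun et => PySem.Set.contains subs (PySem.Str.replace et "_" " ")))

-- ===== PRECONDITION & SPEC =====
def Spec_candidate_event_types_from_sentence_py (sentence_text : String) (allowed_event_types : List String) (out : List String) : Prop := out = candidate_event_types_from_sentence_py_alt sentence_text allowed_event_types
instance (sentence_text : String) (allowed_event_types : List String) (out : List String) : Decidable (Spec_candidate_event_types_from_sentence_py sentence_text allowed_event_types out) := by unfold Spec_candidate_event_types_from_sentence_py; infer_instance

-- ===== CLAIM (what is proved, stated in full; the proofs are below) =====
def Claim_equal_candidate_event_types_from_sentence_py : Prop := ∀ (sentence_text : String) (allowed_event_types : List String), Dom_candidate_event_types_from_sentence_py sentence_text allowed_event_types → Spec_candidate_event_types_from_sentence_py sentence_text allowed_event_types (candidate_event_types_from_sentence_py sentence_text allowed_event_types)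

-- ===== LEMMAS AND PROOFS =====

-- the condition A tests for one event type (skip + nonempty-phrase + substring scan)
def pvCondA (text_upper et : String) : Bool :=
  (!(et == "OTHER_EVENT")) &&
    (PySem.Str.replace et "_" " " != "" && PySem.Str.isIn (PySem.Str.replace et "_" " ") text_upper)

-- B's substring index, as the list it is built from
def pvSubsList (text_upper : String) (maxlen : Int) : List String :=
  (PySem.List.pyRange 0 (PySem.Str.len text_upper) 1).flatMap (fun i =>
    (PySem.List.pyRange 1 (maxlen + 1) 1).map (fun l =>
      PySem.Str.slice text_upper (some i) (some (i + l))))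

-- membership in the substring index = "nonempty and an infix of the text"
lemma pv_mem_subsList_iff (tu p : String) (maxlen : Int)
    (hlen : (p.toList.length : Int) ≤ maxlen) :
    p ∈ pvSubsList tu maxlen ↔ (p.toList ≠ [] ∧ p.toList <:+: tu.toList) := by
  unfold pvSubsList
  simp only [List.mem_flatMap, List.mem_map, PySem.List.mem_pyRange_one]
  constructor
  · rintro ⟨i, ⟨hi0, hin⟩, l, ⟨hl1, _⟩, rfl⟩
    rw [PySem.Str.len_eq] at hin
    have htl : (PySem.Str.slice tu (some i) (some (i + l))).toList
        = List.take ((i + l).toNat - i.toNat) (List.drop i.toNat tu.toList) := by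
      rw [PySem.Str.toList_slice, PySem.Chars.slice_eq_listSlice,
        PySem.List.slice_toNat tu.toList hi0 (by omega)]
    have hnat : (i + l).toNat - i.toNat = l.toNat := by omega
    have hidx : i.toNat < tu.toList.length := by omega
    constructor
    · intro hnil
      have hz : (List.take ((i + l).toNat - i.toNat) (List.drop i.toNat tu.toList)).length = 0 := by
        rw [← htl, hnil]; rfl
      rw [List.length_take, List.length_drop] at hz
      omega
    · rw [htl]
      exact ((List.take_prefix _ _).isInfix).trans ((List.drop_suffix i.toNat tu.toList).isInfix)
  · rintro ⟨hne, hinf⟩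
    obtain ⟨s, t, hst⟩ := hinf
    have hL : 1 ≤ p.toList.length := List.length_pos_of_ne_nil hne
    have hlen_tu : tu.toList.length = s.length + p.toList.length + t.length := by
      rw [← hst]; simp; omega
    refine ⟨(s.length : Int), ⟨by positivity, ?_⟩, (p.toList.length : Int), ⟨by exact_mod_cast hL, by omega⟩, ?_⟩
    · rw [PySem.Str.len_eq]; exact_mod_cast (by omega : s.length < tu.toList.length)
    · rw [← String.toList_inj, PySem.Str.toList_slice, PySem.Chars.slice_eq_listSlice,
        PySem.List.slice_toNat tu.toList (by positivity) (by positivity)]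
      have h1 : ((s.length : Int) + (p.toList.length : Int)).toNat - (s.length : Int).toNat
          = p.toList.length := by omega
      rw [h1, Int.toNat_natCast, ← hst, List.append_assoc, List.drop_left, List.take_left]

-- A's per-element test equals B's set lookup, for phrases no longer than maxlen
lemma pv_cond_eq (tu p : String) (maxlen : Int)
    (hlen : (p.toList.length : Int) ≤ maxlen) :
    (p != "" && PySem.Str.isIn p tu)
      = PySem.Set.contains (PySem.Set.ofList (pvSubsList tu maxlen)) p := by
  rw [Bool.eq_iff_iff, PySem.Set.contains_iff, PySem.Set.mem_ofList,
    pv_mem_subsList_iff tu p maxlen hlen]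
  simp only [Bool.and_eq_true, bne_iff_ne, ne_eq, PySem.Str.isIn_iff_infix]
  constructor
  · rintro ⟨h1, h2⟩
    exact ⟨fun h => h1 (String.toList_inj.mp (by simpa using h)), h2⟩
  · rintro ⟨h1, h2⟩
    exact ⟨fun h => h1 (by simp [h]), h2⟩

-- B is the ofList of a double filter over the sorted list
lemma pv_portB_eq (st : String) (ats : List String) :
    candidate_event_types_from_sentence_py_alt st ats
      = PySem.Set.ofList
          (((PySem.List.sorted ats (fun x => x)).filter (fun et => et != "OTHER_EVENT")).filter
            (fun et => PySem.Set.contains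
              (PySem.Set.ofList (pvSubsList (PySem.Str.upper st)
                (PySem.List.maxD (((PySem.List.sorted ats (fun x => x)).filter
                  (fun et => et != "OTHER_EVENT")).map
                    (fun et => PySem.Str.len (PySem.Str.replace et "_" " "))) (fun x => x) 0)))
              (PySem.Str.replace et "_" " "))) := rfl

-- A's fold is the filter of the sorted list by pvCondA
lemma pv_portA_eq (st : String) (ats : List String) :
    candidate_event_types_from_sentence_py st ats
      = PySem.Set.ofList ((PySem.List.sorted ats (fun x => x)).filter
          (pvCondA (PySem.Str.upper st))) := by
  unfold candidate_event_types_from_sentence_py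
  rw [PySem.Set.ofList_eq_foldl, List.foldl_filter]
  show List.foldl _ PySem.Set.empty _ = _
  congr 1
  funext out et
  cases h : (et == "OTHER_EVENT") <;> simp [pvCondA, h]

-- ===== VERDICT (by name: the statement is the Claim_ definition above) =====
theorem candidate_event_types_from_sentence_py_spec : Claim_equal_candidate_event_types_from_sentence_py := by
  intro st ats _
  unfold Spec_candidate_event_types_from_sentence_py
  rw [pv_portA_eq, pv_portB_eq, List.filter_filter]
  refine congrArg PySem.Set.ofList (List.filter_congr ?_)
  intro et hmem
  cases h : (et == "OTHER_EVENT") with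
  | true => simp [pvCondA, h, bne]
  | false =>
    have hkept : et ∈ (PySem.List.sorted ats (fun x => x)).filter
        (fun et => et != "OTHER_EVENT") :=
      List.mem_filter.mpr ⟨hmem, by simp [bne, h]⟩
    have hlen := PySem.List.le_maxD_id _ 0 _
      (List.mem_map_of_mem (f := fun et => PySem.Str.len (PySem.Str.replace et "_" " ")) hkept)
    simp only [PySem.Str.len_eq] at hlen
    simp only [pvCondA, h, Bool.not_false, Bool.true_and, bne, Bool.and_true]
    exact pv_cond_eq _ _ _ hlen
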